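-- pv_equiv track=rewrite | github.com/nemanjaporobic/code-prep | problems/euclid/01_problem/main.py | gcd_of_string
-- ===== SOURCE A (Python) =====
-- def gcd_of_string(str1: str, str2: str) -> str:
--     if str1 + str2 != str2 + str1:
--         return ""
--
--     def gcd(len1, len2):
--         while len2:
--             len1, len2 = len2, len1 % len2
--         return len1
--
--     return str1[:gcd(len(str1), len(str2))]
-- ===== SOURCE B (Python) =====
-- def gcd_of_string(str1: str, str2: str) -> str:
--     n, m = len(str1), len(str2)
--     for l in range(max(n, m), 0, -1):
--         if n % l == 0 and m % l == 0:
--             base = str1[:l]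
--             if base * (n // l) == str1 and base * (m // l) == str2:
--                 return base
--     return ""
-- ===== Notes on version B (the rewrite author's own statement) =====
-- stated objective: alternative
-- what changed: Replaced the concatenation-commutativity test plus Euclid's numeric GCD by a direct descending search over candidate base lengths that divide both string lengths, verifying by repetition.
import Mathlib
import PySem

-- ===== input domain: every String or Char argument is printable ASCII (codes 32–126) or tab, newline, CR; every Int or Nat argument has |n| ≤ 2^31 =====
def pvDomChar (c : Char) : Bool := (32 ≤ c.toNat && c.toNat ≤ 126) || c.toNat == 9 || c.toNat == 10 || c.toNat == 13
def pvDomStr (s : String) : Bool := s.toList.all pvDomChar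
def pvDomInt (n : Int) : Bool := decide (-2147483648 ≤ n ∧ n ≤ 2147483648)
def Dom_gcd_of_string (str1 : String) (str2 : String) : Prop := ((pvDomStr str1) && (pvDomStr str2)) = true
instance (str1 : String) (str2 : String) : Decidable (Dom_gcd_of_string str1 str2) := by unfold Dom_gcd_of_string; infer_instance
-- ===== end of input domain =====

-- B replaces the concatenation-commutativity test + Euclid's GCD by a descending search
-- over base lengths dividing both string lengths, verified by repetition (alternative algorithm).

-- ===== PORT A =====
-- the inner 'def gcd(len1, len2): while len2: len1, len2 = len2, len1 % len2; return len1'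
def pyGcdLoop (len1 len2 : Nat) : Nat :=
  if h2z : len2 = 0 then len1 else pyGcdLoop len2 (len1 % len2)
termination_by len2
decreasing_by exact Nat.mod_lt _ (Nat.pos_of_ne_zero h2z)

-- string concatenation/equality and str1[:g] ported on the code-point lists (exact for Python str)
def gcd_of_string (str1 : String) (str2 : String) : String :=
  let a := str1.toList
  let b := str2.toList
  if a ++ b ≠ b ++ a then ""
  else String.ofList (a.take (pyGcdLoop a.length b.length))

-- ===== PORT B =====
-- base * k  (Python string repetition)
def strRep (c : List Char) (k : Nat) : List Char :=
  match k with
  | 0 => []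
  | k + 1 => c ++ strRep c k

-- 'for l in range(max(n,m), 0, -1): …' as descending recursion on l
def altLoop (a b : List Char) (n m : Nat) : Nat → List Char
  | 0 => []
  | l + 1 =>
    if n % (l + 1) = 0 ∧ m % (l + 1) = 0 then
      let base := a.take (l + 1)
      if strRep base (n / (l + 1)) = a ∧ strRep base (m / (l + 1)) = b then base
      else altLoop a b n m l
    else altLoop a b n m l

def gcd_of_string_alt (str1 : String) (str2 : String) : String :=
  let a := str1.toList
  let b := str2.toList
  String.ofList (altLoop a b a.length b.length (max a.length b.length))

-- ===== PRECONDITION & SPEC =====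
def Spec_gcd_of_string (str1 : String) (str2 : String) (out : String) : Prop := out = gcd_of_string_alt str1 str2
instance (str1 : String) (str2 : String) (out : String) : Decidable (Spec_gcd_of_string str1 str2 out) := by unfold Spec_gcd_of_string; infer_instance

-- ===== CLAIM (what is proved, stated in full; the proofs are below) =====
def Claim_equal_gcd_of_string : Prop := ∀ (str1 : String) (str2 : String), Dom_gcd_of_string str1 str2 → Spec_gcd_of_string str1 str2 (gcd_of_string str1 str2)

-- ===== LEMMAS AND PROOFS =====

theorem pyGcdLoop_eq (len2 len1 : Nat) : pyGcdLoop len1 len2 = Nat.gcd len1 len2 := by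
  induction len2 using Nat.strong_induction_on generalizing len1 with
  | _ len2 ih =>
    unfold pyGcdLoop
    by_cases h : len2 = 0
    · simp [h]
    · simp only [h, dite_false]
      rw [ih (len1 % len2) (Nat.mod_lt _ (Nat.pos_of_ne_zero h)) len2]
      rw [Nat.gcd_comm len2 (len1 % len2), ← Nat.gcd_rec, Nat.gcd_comm]

theorem strRep_length (c : List Char) (k : Nat) : (strRep c k).length = k * c.length := by
  induction k with
  | zero => simp [strRep]
  | succ k ih => simp [strRep, ih, Nat.succ_mul, Nat.add_comm]

theorem strRep_add (c : List Char) (i j : Nat) :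
    strRep c (i + j) = strRep c i ++ strRep c j := by
  induction i with
  | zero => simp [strRep]
  | succ i ih => simp [strRep, Nat.succ_add, ih]

theorem strRep_rep (c : List Char) (i j : Nat) :
    strRep (strRep c i) j = strRep c (i * j) := by
  induction j with
  | zero => simp [strRep]
  | succ j ih =>
    show strRep c i ++ strRep (strRep c i) j = _
    rw [ih, ← strRep_add, Nat.mul_succ, Nat.add_comm]

theorem strRep_take (c : List Char) (j k : Nat) (h : j ≤ k) :
    (strRep c k).take (j * c.length) = strRep c j := by
  have : strRep c k = strRep c j ++ strRep c (k - j) := by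
    rw [← strRep_add, Nat.add_sub_cancel' h]
  rw [this, ← strRep_length c j, List.take_left]

-- the easy direction: common-base repetitions commute
theorem comm_of_rep {c a b : List Char} {i j : Nat}
    (ha : strRep c i = a) (hb : strRep c j = b) : a ++ b = b ++ a := by
  rw [← ha, ← hb, ← strRep_add, ← strRep_add, Nat.add_comm]

-- the hard direction: commuting lists are repetitions of a common base
theorem rep_of_comm (N : Nat) : ∀ (a b : List Char), a.length + b.length ≤ N →
    a ++ b = b ++ a → ∃ c i j, strRep c i = a ∧ strRep c j = b := by
  induction N with
  | zero =>
    intro a b hN _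
    have ha : a = [] := by cases a <;> simp_all
    have hb : b = [] := by cases b <;> simp_all
    exact ⟨[], 0, 0, by simp [strRep, ha], by simp [strRep, hb]⟩
  | succ N ih =>
    intro a b hN hcomm
    rcases Nat.eq_zero_or_pos a.length with hza | hza
    · have ha : a = [] := List.length_eq_zero_iff.mp hza
      exact ⟨b, 0, 1, by simp [strRep, ha], by simp [strRep]⟩
    rcases Nat.eq_zero_or_pos b.length with hzb | hzb
    · have hb : b = [] := List.length_eq_zero_iff.mp hzb
      exact ⟨a, 1, 0, by simp [strRep], by simp [strRep, hb]⟩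
    rcases Nat.le_total a.length b.length with hle | hle
    · -- a is a prefix of b: b = a ++ t, and a, t commute
      have hpre : a = b.take a.length := by
        have := congrArg (List.take a.length) hcomm
        simpa [List.take_left, List.take_append_of_le_length hle] using this
      set t := b.drop a.length with ht
      have hb : b = a ++ t := by rw [hpre, ht, List.take_append_drop]
      have hcomm' : a ++ t = t ++ a := by
        have : a ++ (a ++ t) = (a ++ t) ++ a := by rw [← hb]; exact hcomm
        rw [List.append_assoc] at this
        exact List.append_cancel_left this
      have hlen : a.length + t.length ≤ N := by
        have : t.length = b.length - a.length := by simp [ht]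
        omega
      obtain ⟨c, i, j, hca, hct⟩ := ih a t hlen hcomm'
      exact ⟨c, i, i + j, hca, by rw [strRep_add, hca, hct, hb]⟩
    · -- symmetric: b is a prefix of a
      have hpre : b = a.take b.length := by
        have := congrArg (List.take b.length) hcomm
        simpa [List.take_left, List.take_append_of_le_length hle] using this.symm
      set t := a.drop b.length with ht
      have ha : a = b ++ t := by rw [hpre, ht, List.take_append_drop]
      have hcomm' : b ++ t = t ++ b := by
        have : b ++ (b ++ t) = (b ++ t) ++ b := by rw [← ha]; exact hcomm.symm
        rw [List.append_assoc] at this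
        exact List.append_cancel_left this
      have hlen : b.length + t.length ≤ N := by
        have : t.length = a.length - b.length := by simp [ht]
        omega
      obtain ⟨c, i, j, hcb, hct⟩ := ih b t hlen hcomm'
      exact ⟨c, i + j, i, by rw [strRep_add, hcb, hct, ha], hcb⟩

-- under commutation with both lengths positive, the gcd-length prefix reconstructs both strings
theorem gcd_base_rep (a b : List Char) (hn : 0 < a.length) (_hm : 0 < b.length)
    (hcomm : a ++ b = b ++ a) :
    let g := Nat.gcd a.length b.length
    strRep (a.take g) (a.length / g) = a ∧ strRep (a.take g) (b.length / g) = b := by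
  intro g
  obtain ⟨c, i, j, hca, hcb⟩ := rep_of_comm (a.length + b.length) a b le_rfl hcomm
  have hla : a.length = i * c.length := by rw [← hca, strRep_length]
  have hcl : 0 < c.length := by
    by_contra h0
    have h00 : c.length = 0 := by omega
    rw [h00, Nat.mul_zero] at hla
    omega
  have hlb : b.length = j * c.length := by rw [← hcb, strRep_length]
  have hdvdg : c.length ∣ g :=
    Nat.dvd_gcd ⟨i, by rw [hla, Nat.mul_comm]⟩ ⟨j, by rw [hlb, Nat.mul_comm]⟩
  have hgpos : 0 < g := Nat.gcd_pos_of_pos_left _ hn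
  have hgn : g ∣ a.length := Nat.gcd_dvd_left _ _
  have hgm : g ∣ b.length := Nat.gcd_dvd_right _ _
  -- a.take g = strRep c (g / c.length)
  have htake : a.take g = strRep c (g / c.length) := by
    have hle : g / c.length ≤ i := by
      have hga : g ≤ a.length := Nat.le_of_dvd hn hgn
      calc g / c.length ≤ a.length / c.length := Nat.div_le_div_right hga
        _ = i := by rw [hla, Nat.mul_div_cancel _ hcl]
    rw [← hca, ← strRep_take c (g / c.length) i hle, Nat.div_mul_cancel hdvdg]
  constructor
  · rw [htake, strRep_rep]
    have hx : g / c.length * (a.length / g) * c.length = a.length := by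
      rw [Nat.mul_assoc, Nat.mul_comm (a.length / g), ← Nat.mul_assoc,
        Nat.div_mul_cancel hdvdg, Nat.mul_div_cancel' hgn]
    have hk : g / c.length * (a.length / g) = i :=
      Nat.eq_of_mul_eq_mul_right hcl (by rw [hx, hla])
    rw [hk, hca]
  · rw [htake, strRep_rep]
    have hx : g / c.length * (b.length / g) * c.length = b.length := by
      rw [Nat.mul_assoc, Nat.mul_comm (b.length / g), ← Nat.mul_assoc,
        Nat.div_mul_cancel hdvdg, Nat.mul_div_cancel' hgm]
    have hk : g / c.length * (b.length / g) = j :=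
      Nat.eq_of_mul_eq_mul_right hcl (by rw [hx, hlb])
    rw [hk, hcb]

-- if the strings do not commute, every candidate fails and the loop returns []
theorem altLoop_of_not_comm (a b : List Char) (hcomm : a ++ b ≠ b ++ a) :
    ∀ L, altLoop a b a.length b.length L = [] := by
  intro L
  induction L with
  | zero => rfl
  | succ L ih =>
    unfold altLoop
    split_ifs with h1
    · dsimp only
      split_ifs with h2
      · exact absurd (comm_of_rep h2.1 h2.2) hcomm
      · exact ih
    · exact ih

-- on an empty first string the loop returns [] (the successful base can only be [])
theorem altLoop_nil (b : List Char) (m : Nat) : ∀ L, altLoop [] b 0 m L = [] := by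
  intro L
  induction L with
  | zero => rfl
  | succ L ih =>
    unfold altLoop
    split_ifs with h1
    · dsimp only
      split_ifs with h2
      · rfl
      · exact ih
    · exact ih

-- if the strings commute and both are nonempty, the loop down from any L ≥ gcd returns the gcd prefix
theorem altLoop_of_comm (a b : List Char) (hn : 0 < a.length) (hm : 0 < b.length)
    (hcomm : a ++ b = b ++ a) :
    ∀ L, Nat.gcd a.length b.length ≤ L →
      altLoop a b a.length b.length L = a.take (Nat.gcd a.length b.length) := by
  intro L
  induction L with
  | zero =>
    intro hL
    have : 0 < Nat.gcd a.length b.length := Nat.gcd_pos_of_pos_left _ hn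
    omega
  | succ L ih =>
    intro hL
    set g := Nat.gcd a.length b.length with hg
    rcases Nat.lt_or_ge L.succ g.succ with hlt | hgt
    · -- L + 1 = g : the check succeeds
      have heq : L + 1 = g := by omega
      obtain ⟨h1, h2⟩ := gcd_base_rep a b hn hm hcomm
      unfold altLoop
      rw [heq]
      simp only [← hg] at h1 h2 ⊢
      rw [if_pos ⟨Nat.mod_eq_zero_of_dvd (Nat.gcd_dvd_left _ _),
        Nat.mod_eq_zero_of_dvd (Nat.gcd_dvd_right _ _)⟩]
      rw [if_pos ⟨h1, h2⟩]
    · -- L + 1 > g : divisibility cannot hold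
      have hgle : g ≤ L := by omega
      unfold altLoop
      split_ifs with h1
      · exfalso
        have : (L + 1) ∣ g := Nat.dvd_gcd (Nat.dvd_of_mod_eq_zero h1.1) (Nat.dvd_of_mod_eq_zero h1.2)
        have := Nat.le_of_dvd (Nat.gcd_pos_of_pos_left _ hn) this
        omega
      · exact ih hgle

-- A's value as a string of a list: "" = String.ofList []
theorem ofList_nil : ("" : String) = String.ofList [] := rfl

-- ===== VERDICT (by name: the statement is the Claim_ definition above) =====
theorem gcd_of_string_spec : Claim_equal_gcd_of_string := by
  intro str1 str2 _
  unfold Spec_gcd_of_string gcd_of_string gcd_of_string_alt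
  simp only []
  generalize str1.toList = a
  generalize str2.toList = b
  by_cases hcomm : a ++ b = b ++ a
  · simp only [hcomm, ne_eq, not_true_eq_false, if_false]
    rcases Nat.eq_zero_or_pos a.length with hn | hn
    · -- a = []: both compute []
      have ha : a = [] := List.length_eq_zero_iff.mp hn
      subst ha
      simp only [List.length_nil, Nat.max_eq_right (Nat.zero_le _), altLoop_nil,
        List.take_nil]
    rcases Nat.eq_zero_or_pos b.length with hm | hm
    · -- b = [], a ≠ []: both return a
      have hb : b = [] := List.length_eq_zero_iff.mp hm
      subst hb
      have hmax : max a.length ([] : List Char).length = a.length := by simp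
      rw [hmax]
      have hB : altLoop a [] a.length ([] : List Char).length a.length = a := by
        obtain ⟨L, hL⟩ : ∃ L, a.length = L + 1 := ⟨a.length - 1, by omega⟩
        rw [hL]
        unfold altLoop
        rw [if_pos ⟨by rw [← hL]; exact Nat.mod_self _, by simp⟩]
        rw [if_pos ⟨by rw [← hL, Nat.div_self hn, List.take_length]; simp [strRep],
          by rw [← hL]; simp [Nat.div_eq_of_lt hn, strRep]⟩]
        rw [← hL, List.take_length]
      rw [hB]
      simp only [List.length_nil, pyGcdLoop_eq]
      rw [Nat.gcd_zero_right, List.take_length]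
    · -- both nonempty
      have hgle : Nat.gcd a.length b.length ≤ max a.length b.length :=
        le_trans (Nat.le_of_dvd hn (Nat.gcd_dvd_left _ _)) (Nat.le_max_left _ _)
      rw [altLoop_of_comm a b hn hm hcomm _ hgle, pyGcdLoop_eq]
  · simp only [hcomm, ne_eq, not_false_eq_true, if_true]
    rw [altLoop_of_not_comm a b hcomm, ofList_nil]
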